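-- pv_equiv track=rewrite | github.com/santosba/SocioCamara | AlgoExpert.py | bestSeat
-- ===== SOURCE A (Python) =====
-- def bestSeat(seats):
--     # Write your code here.
--     bestSeat = -1
--     maxSpace = 0
--     left = 0
--
--     while left < len(seats):
--         # Skip if current seat is empty (we need occupied seat to start from)
--         if seats[left] == 0:
--             left += 1
--             continue
--
--         # Find the next occupied seat
--         right = left + 1
--         while right < len(seats) and seats[right] == 0:
--             right += 1
--
--         # Calculate available space between occupied seats
--         if right < len(seats):  # Found another occupied seat
--             availableSpace = right - left - 1
--             if availableSpace > maxSpace: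
--                 bestSeat = (left + right) // 2
--                 maxSpace = availableSpace
--
--         left = right if right < len(seats) else left + 1
--
--     return bestSeat
-- ===== SOURCE B (Python) =====
-- def bestSeat(seats):
--     # Index-table approach: collect occupied positions once, then scan consecutive pairs.
--     occupied = [i for i, s in enumerate(seats) if s != 0]
--     best, maxSpace = -1, 0
--     for a, b in zip(occupied, occupied[1:]):
--         space = b - a - 1
--         if space > maxSpace:
--             best, maxSpace = (a + b) // 2, space
--     return best
-- ===== Notes on version B (the rewrite author's own statement) =====
-- stated objective: simpler
-- what changed: Replaced A's nested two-pointer while loops over seat indices with a one-shot index table of occupied positions followed by a single pass over consecutive pairs.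
import Mathlib
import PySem

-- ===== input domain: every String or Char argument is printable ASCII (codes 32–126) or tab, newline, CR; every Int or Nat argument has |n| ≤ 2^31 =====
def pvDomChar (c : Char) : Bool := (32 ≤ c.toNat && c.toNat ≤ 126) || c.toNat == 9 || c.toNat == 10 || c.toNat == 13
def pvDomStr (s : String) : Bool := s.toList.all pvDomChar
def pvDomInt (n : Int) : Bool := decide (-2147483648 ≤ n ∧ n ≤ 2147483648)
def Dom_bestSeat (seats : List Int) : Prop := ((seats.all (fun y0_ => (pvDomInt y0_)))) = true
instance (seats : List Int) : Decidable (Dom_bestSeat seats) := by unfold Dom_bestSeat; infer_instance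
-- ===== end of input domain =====

-- B replaces A's two-pointer while-loop scan by an occupied-index table plus a
-- pairwise pass (objective: simpler); return values proved equal on all inputs.

-- ===== PORT A =====
-- inner `while right < len(seats) and seats[right] == 0: right += 1`
-- (fuel only makes the loop total: `seats.length` steps always suffice;
--  the index is always in range when read, so getD is exact)
def findRightA (seats : List Int) : Nat → Nat → Nat
  | 0, r => r
  | fuel + 1, r =>
    if r < seats.length ∧ seats.getD r 0 = 0 then findRightA seats fuel (r + 1) else r

-- outer `while left < len(seats): …` (fuel: `seats.length + 1` steps suffice)
def loopA (seats : List Int) : Nat → Nat → Int → Int → Int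
  | 0, _, best, _ => best
  | fuel + 1, left, best, maxSpace =>
    if left < seats.length then
      if seats.getD left 0 = 0 then
        loopA seats fuel (left + 1) best maxSpace
      else
        let right := findRightA seats seats.length (left + 1)
        if right < seats.length then
          let availableSpace : Int := (right : Int) - (left : Int) - 1
          if availableSpace > maxSpace then
            loopA seats fuel right (PySem.Int.floordiv ((left : Int) + (right : Int)) 2) availableSpace
          else loopA seats fuel right best maxSpace
        else loopA seats fuel (left + 1) best maxSpace
    else best

def bestSeat (seats : List Int) : Int := loopA seats (seats.length + 1) 0 (-1) 0

-- ===== PORT B =====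
def stepB (st : Int × Int) (p : Int × Int) : Int × Int :=
  let space := p.2 - p.1 - 1
  if space > st.2 then (PySem.Int.floordiv (p.1 + p.2) 2, space) else st

def bestSeat_alt (seats : List Int) : Int :=
  let occupied := ((PySem.List.enumerate seats).filter (fun p => p.2 != 0)).map (·.1)
  ((occupied.zip occupied.tail).foldl stepB (-1, 0)).1

-- ===== PRECONDITION & SPEC =====
def Spec_bestSeat (seats : List Int) (out : Int) : Prop := out = bestSeat_alt seats
instance (seats : List Int) (out : Int) : Decidable (Spec_bestSeat seats out) := by unfold Spec_bestSeat; infer_instance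

-- ===== CLAIM (what is proved, stated in full; the proofs are below) =====
def Claim_equal_bestSeat : Prop := ∀ (seats : List Int), Dom_bestSeat seats → Spec_bestSeat seats (bestSeat seats)

-- ===== LEMMAS AND PROOFS =====

-- occupied indices of `seats` that are ≥ left, as Ints, in increasing order
def occFrom (seats : List Int) (left : Nat) : List Int :=
  if left < seats.length then
    if seats.getD left 0 ≠ 0 then (left : Int) :: occFrom seats (left + 1)
    else occFrom seats (left + 1)
  else []
termination_by seats.length - left
decreasing_by all_goals omega

def pairFold (l : List Int) (b m : Int) : Int := ((l.zip l.tail).foldl stepB (b, m)).1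

lemma occFrom_ge (seats : List Int) (left : Nat) (h : seats.length ≤ left) :
    occFrom seats left = [] := by
  rw [occFrom]; simp [Nat.not_lt.mpr h]

lemma occFrom_zero (seats : List Int) (left : Nat) (hl : left < seats.length)
    (h : seats.getD left 0 = 0) : occFrom seats left = occFrom seats (left + 1) := by
  rw [occFrom, if_pos hl, if_neg (not_not_intro h)]

lemma occFrom_occ (seats : List Int) (left : Nat) (hl : left < seats.length)
    (h : seats.getD left 0 ≠ 0) :
    occFrom seats left = (left : Int) :: occFrom seats (left + 1) := by
  rw [occFrom, if_pos hl, if_pos h]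

lemma findRightA_ge (seats : List Int) (fuel r : Nat) : r ≤ findRightA seats fuel r := by
  induction fuel generalizing r with
  | zero => simp [findRightA]
  | succ fuel ih =>
    rw [findRightA]
    split
    · have := ih (r + 1); omega
    · omega

lemma findRightA_spec (seats : List Int) (fuel r : Nat) (hf : seats.length - r ≤ fuel) :
    occFrom seats r = occFrom seats (findRightA seats fuel r) ∧
      (findRightA seats fuel r < seats.length →
        seats.getD (findRightA seats fuel r) 0 ≠ 0) := by
  induction fuel generalizing r with
  | zero =>
    refine ⟨rfl, fun hr => ?_⟩
    simp only [findRightA] at hr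
    omega
  | succ fuel ih =>
    rw [findRightA]
    split
    · rename_i h
      have := ih (r + 1) (by omega)
      exact ⟨(occFrom_zero seats r h.1 h.2).trans this.1, this.2⟩
    · rename_i h
      exact ⟨rfl, fun hr => (not_and.mp h) hr⟩

lemma loopA_empty (seats : List Int) (fuel left : Nat) (b m : Int)
    (h : occFrom seats left = []) : loopA seats fuel left b m = b := by
  induction fuel generalizing left with
  | zero => rfl
  | succ fuel ih =>
    rw [loopA]
    split
    · rename_i hl
      have hz : seats.getD left 0 = 0 := by
        by_contra hnz
        rw [occFrom_occ seats left hl hnz] at h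
        exact absurd h (List.cons_ne_nil _ _)
      rw [if_pos hz]
      exact ih (left + 1) ((occFrom_zero seats left hl hz).symm.trans h)
    · rfl

lemma pairFold_cons_cons (a c : Int) (t : List Int) (b m : Int) :
    pairFold (a :: c :: t) b m
      = pairFold (c :: t) (stepB (b, m) (a, c)).1 (stepB (b, m) (a, c)).2 := by
  unfold pairFold
  simp [List.zip]

lemma loopA_eq (seats : List Int) (fuel left : Nat) (b m : Int)
    (hf : seats.length - left < fuel) :
    loopA seats fuel left b m = pairFold (occFrom seats left) b m := by
  induction fuel generalizing left b m with
  | zero => omega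
  | succ fuel ih =>
    rw [loopA]
    split
    · rename_i hl
      by_cases hz : seats.getD left 0 = 0
      · rw [if_pos hz, occFrom_zero seats left hl hz]
        exact ih (left + 1) b m (by omega)
      · rw [if_neg hz, occFrom_occ seats left hl hz]
        have hspec := findRightA_spec seats seats.length (left + 1) (by omega)
        have hge := findRightA_ge seats seats.length (left + 1)
        dsimp only
        split
        · rename_i hr
          rw [hspec.1, occFrom_occ seats _ hr (hspec.2 hr),
              pairFold_cons_cons]
          by_cases hs : ((findRightA seats seats.length (left + 1) : Int) - (left : Int) - 1) > m
          · rw [if_pos hs]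
            rw [ih (findRightA seats seats.length (left + 1)) _ _ (by omega),
                occFrom_occ seats _ hr (hspec.2 hr)]
            simp [stepB, hs]
          · rw [if_neg hs]
            rw [ih (findRightA seats seats.length (left + 1)) b m (by omega),
                occFrom_occ seats _ hr (hspec.2 hr)]
            simp [stepB, hs]
        · rename_i hr
          have h1 : occFrom seats (left + 1) = [] := by
            rw [hspec.1]; exact occFrom_ge seats _ (by omega)
          rw [h1, loopA_empty seats fuel (left + 1) b m h1]
          unfold pairFold
          simp [List.zip]
    · rename_i hl
      rw [occFrom_ge seats left (by omega)]
      unfold pairFold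
      simp [List.zip]

lemma occ_drop (seats : List Int) (left : Nat) :
    occFrom seats left
      = ((PySem.List.enumerate (seats.drop left) (left : Int)).filter
          (fun p => p.2 != 0)).map (·.1) := by
  rw [occFrom]
  split
  · rename_i hl
    have hd : seats.drop left = seats[left] :: seats.drop (left + 1) :=
      List.drop_eq_getElem_cons hl
    have hg : seats.getD left 0 = seats[left] := List.getD_eq_getElem seats 0 hl
    rw [hd, PySem.List.enumerate_cons]
    have ih := occ_drop seats (left + 1)
    by_cases hz : seats[left] = 0
    · rw [if_neg (by rw [hg]; exact fun h => h hz)]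
      simp only [List.filter_cons, hz]
      simp only [bne_self_eq_false, ih]
      push_cast
      rfl
    · rw [if_pos (by rw [hg]; exact hz)]
      simp only [List.filter_cons]
      rw [if_pos (by simpa using hz)]
      simp only [List.map_cons, ih]
      push_cast
      rfl
  · rename_i hl
    rw [List.drop_eq_nil_of_le (by omega)]
    rfl
termination_by seats.length - left
decreasing_by all_goals omega

lemma occ_alt_eq (seats : List Int) :
    ((PySem.List.enumerate seats).filter (fun p => p.2 != 0)).map (·.1)
      = occFrom seats 0 := by
  rw [occ_drop seats 0]
  rfl

-- ===== VERDICT (by name: the statement is the Claim_ definition above) =====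
theorem bestSeat_spec : Claim_equal_bestSeat := by
  intro seats _
  unfold Spec_bestSeat bestSeat bestSeat_alt
  rw [occ_alt_eq]
  exact loopA_eq seats (seats.length + 1) 0 (-1) 0 (by omega)
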